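-- pv_equiv track=rewrite | github.com/marctjones/klareco | scripts/extract_gutenberg_sentences.py | normalize_cx_system
-- ===== SOURCE A (Python) =====
-- def normalize_cx_system(text: str) -> str:
--     """Convert CX-system (CX, GX, etc.) to Unicode (ĉ, ĝ, etc.)."""
--     replacements = {
--         'CX': 'Ĉ', 'cx': 'ĉ',
--         'GX': 'Ĝ', 'gx': 'ĝ',
--         'HX': 'Ĥ', 'hx': 'ĥ',
--         'JX': 'Ĵ', 'jx': 'ĵ',
--         'SX': 'Ŝ', 'sx': 'ŝ',
--         'UX': 'Ŭ', 'ux': 'ŭ',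
--     }
--
--     for old, new in replacements.items():
--         text = text.replace(old, new)
--
--     return text
-- ===== SOURCE B (Python) =====
-- def normalize_cx_system(text: str) -> str:
--     """Convert CX-system (CX, GX, etc.) to Unicode (ĉ, ĝ, etc.) in one scan."""
--     digraphs = {}
--     for up, lo, up_hat, lo_hat in zip('CGHJSU', 'cghjsu', 'ĈĜĤĴŜŬ', 'ĉĝĥĵŝŭ'):
--         digraphs[up + 'X'] = up_hat
--         digraphs[lo + 'x'] = lo_hat
--     out = []
--     i = 0
--     n = len(text)
--     while i < n:
--         rep = digraphs.get(text[i:i + 2])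
--         if rep is not None:
--             out.append(rep)
--             i += 2
--         else:
--             out.append(text[i])
--             i += 1
--     return ''.join(out)
-- ===== Notes on version B (the rewrite author's own statement) =====
-- stated objective: alternative
-- what changed: Replaces twelve sequential whole-string .replace passes with a digraph dict built from the six base letters and a single left-to-right windowed scan (i += 2 on a match, i += 1 otherwise) joined at the end.
import Mathlib
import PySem

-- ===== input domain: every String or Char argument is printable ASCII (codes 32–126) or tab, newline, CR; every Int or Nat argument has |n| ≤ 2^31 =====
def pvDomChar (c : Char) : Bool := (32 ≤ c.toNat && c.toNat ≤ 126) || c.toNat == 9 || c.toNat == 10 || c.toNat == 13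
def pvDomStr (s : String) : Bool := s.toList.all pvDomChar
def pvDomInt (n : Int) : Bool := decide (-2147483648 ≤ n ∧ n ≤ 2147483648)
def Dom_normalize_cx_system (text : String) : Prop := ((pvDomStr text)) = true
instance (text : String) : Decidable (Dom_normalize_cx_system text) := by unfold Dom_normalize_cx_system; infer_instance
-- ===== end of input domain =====

-- B replaces A's twelve sequential whole-string replace passes by one single left-to-right
-- windowed scan over the text (an alternative single-pass algorithm, not measured faster);
-- equal output is proved for all inputs.

-- ===== PORT A =====
-- the dict literal of A
def aReplacements : PySem.Dict String String :=
  PySem.Dict.ofList [("CX","Ĉ"), ("cx","ĉ"), ("GX","Ĝ"), ("gx","ĝ"), ("HX","Ĥ"), ("hx","ĥ"), ("JX","Ĵ"), ("jx","ĵ"), ("SX","Ŝ"), ("sx","ŝ"), ("UX","Ŭ"), ("ux","ŭ")]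

def normalize_cx_system (text : String) : String :=
  -- for old, new in replacements.items(): text = text.replace(old, new)
  aReplacements.items.foldl (fun t p => PySem.Str.replace t p.1 p.2) text

-- ===== PORT B =====
-- B's digraph table, built from the six base letters:
-- for up, lo, up_hat, lo_hat in zip('CGHJSU','cghjsu','ĈĜĤĴŜŬ','ĉĝĥĵŝŭ'): digraphs[up+'X']=up_hat; digraphs[lo+'x']=lo_hat
def cxDigraphs : PySem.Dict String String :=
  ((("CGHJSU".toList.zip "cghjsu".toList).zip ("ĈĜĤĴŜŬ".toList.zip "ĉĝĥĵŝŭ".toList))).foldl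
    (fun d q =>
      (d.insert (String.ofList [q.1.1, 'X']) (String.ofList [q.2.1])).insert
        (String.ofList [q.1.2, 'x']) (String.ofList [q.2.2]))
    PySem.Dict.empty

-- the while loop of B: at position i look up text[i:i+2]; on a hit emit it and jump 2, else copy one char
def cxScan : List Char → List Char
  | [] => []
  | c :: t =>
    match cxDigraphs.get? (String.ofList (c :: t.take 1)) with
    | some r => r.toList ++ cxScan (t.drop 1)
    | none => c :: cxScan t
  termination_by l => l.length
  decreasing_by
    · simp only [List.length_cons, List.length_drop]; omega
    · simp

def normalize_cx_system_alt (text : String) : String :=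
  String.ofList (cxScan text.toList)

-- ===== PRECONDITION & SPEC =====
def Spec_normalize_cx_system (text : String) (out : String) : Prop := out = normalize_cx_system_alt text
instance (text : String) (out : String) : Decidable (Spec_normalize_cx_system text out) := by unfold Spec_normalize_cx_system; infer_instance

-- ===== CLAIM (what is proved, stated in full; the proofs are below) =====
def Claim_equal_normalize_cx_system : Prop := ∀ (text : String), Dom_normalize_cx_system text → Spec_normalize_cx_system text (normalize_cx_system text)

-- ===== LEMMAS AND PROOFS =====

-- structural form of one two-character replace pass
def rep (a b : Char) (r : List Char) : List Char → List Char
  | [] => []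
  | c :: t => if c = a ∧ t.head? = some b then r ++ rep a b r t.tail else c :: rep a b r t
  termination_by l => l.length
  decreasing_by
    · simp only [List.length_cons]; have ht := List.length_tail (l := t); omega
    · simp

-- A's replacement table as (first char, second char, replacement chars)
def Ks : List (Char × Char × List Char) :=
  [('C','X',['Ĉ']),
   ('c','x',['ĉ']),
   ('G','X',['Ĝ']),
   ('g','x',['ĝ']),
   ('H','X',['Ĥ']),
   ('h','x',['ĥ']),
   ('J','X',['Ĵ']),
   ('j','x',['ĵ']),
   ('S','X',['Ŝ']),
   ('s','x',['ŝ']),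
   ('U','X',['Ŭ']),
   ('u','x',['ŭ'])]

def chainK (K : List (Char × Char × List Char)) (l : List Char) : List Char :=
  K.foldl (fun l k => rep k.1 k.2.1 k.2.2 l) l

theorem rep_nil (a b : Char) (r : List Char) : rep a b r [] = [] := by
  simp [rep]

theorem rep_cons (a b : Char) (r : List Char) (c : Char) (t : List Char) :
    rep a b r (c :: t) =
      if c = a ∧ t.head? = some b then r ++ rep a b r t.tail else c :: rep a b r t := by
  rw [rep]

theorem go_eq (a b : Char) (r : List Char) :
    ∀ (fuel : Nat) (l acc : List Char), l.length ≤ fuel →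
      PySem.Chars.replace.go [a,b] r fuel l acc = acc.reverse ++ rep a b r l := by
  intro fuel
  induction fuel with
  | zero =>
    intro l acc h
    cases l with
    | nil => simp [PySem.Chars.replace.go, rep_nil]
    | cons c t => simp at h
  | succ n ih =>
    intro l acc h
    match l with
    | [] => simp [PySem.Chars.replace.go, rep_nil]
    | c :: t =>
      rw [PySem.Chars.replace.go]
      match t with
      | [] =>
        have hpre : ([a, b].isPrefixOf [c]) = false := by
          simp [List.isPrefixOf]
        simp only [hpre, Bool.false_eq_true, if_false]
        rw [ih [] (c :: acc) (by simp)]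
        conv_rhs => rw [rep_cons]
        simp [rep_nil]
      | d :: t' =>
        by_cases hm : c = a ∧ d = b
        · obtain ⟨rfl, rfl⟩ := hm
          have hp : ([c, d].isPrefixOf (c :: d :: t')) = true := by
            simp [List.isPrefixOf]
          simp only [hp, if_true]
          have hdrop : List.drop ([c, d] : List Char).length (c :: d :: t') = t' := rfl
          rw [hdrop, ih t' (r.reverse ++ acc) (by simp at h ⊢; omega)]
          conv_rhs => rw [rep_cons, if_pos (by simp)]
          simp
        · have hp : ([a, b].isPrefixOf (c :: d :: t')) = false := by
            simp [List.isPrefixOf]; tauto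
          simp only [hp, Bool.false_eq_true, if_false]
          rw [ih (d :: t') (c :: acc) (by simp at h ⊢; omega)]
          conv_rhs => rw [rep_cons, if_neg (by simp only [List.head?_cons, Option.some.injEq]; exact hm)]
          simp

theorem replace2_eq (a b : Char) (r l : List Char) :
    PySem.Chars.replace l [a,b] r = rep a b r l := by
  rw [PySem.Chars.replace]
  simp only [List.isEmpty_cons, Bool.false_eq_true, if_false]
  rw [go_eq a b r l.length l [] le_rfl]
  simp

set_option maxRecDepth 16384 in
theorem aItems :
    aReplacements.items = [("CX","Ĉ"), ("cx","ĉ"), ("GX","Ĝ"), ("gx","ĝ"), ("HX","Ĥ"), ("hx","ĥ"), ("JX","Ĵ"), ("jx","ĵ"), ("SX","Ŝ"), ("sx","ŝ"), ("UX","Ŭ"), ("ux","ŭ")] := by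
  decide

theorem A_toList (text : String) :
    (normalize_cx_system text).toList = chainK Ks text.toList := by
  rw [normalize_cx_system, aItems]
  simp only [List.foldl_cons, List.foldl_nil]
  simp only [PySem.Str.toList_replace]
  simp only [
             show ("CX" : String).toList = ['C','X'] from rfl,
             show ("cx" : String).toList = ['c','x'] from rfl,
             show ("GX" : String).toList = ['G','X'] from rfl,
             show ("gx" : String).toList = ['g','x'] from rfl,
             show ("HX" : String).toList = ['H','X'] from rfl,
             show ("hx" : String).toList = ['h','x'] from rfl,
             show ("JX" : String).toList = ['J','X'] from rfl,
             show ("jx" : String).toList = ['j','x'] from rfl,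
             show ("SX" : String).toList = ['S','X'] from rfl,
             show ("sx" : String).toList = ['s','x'] from rfl,
             show ("UX" : String).toList = ['U','X'] from rfl,
             show ("ux" : String).toList = ['u','x'] from rfl,
             show ("Ĉ" : String).toList = ['Ĉ'] from rfl,
             show ("ĉ" : String).toList = ['ĉ'] from rfl,
             show ("Ĝ" : String).toList = ['Ĝ'] from rfl,
             show ("ĝ" : String).toList = ['ĝ'] from rfl,
             show ("Ĥ" : String).toList = ['Ĥ'] from rfl,
             show ("ĥ" : String).toList = ['ĥ'] from rfl,
             show ("Ĵ" : String).toList = ['Ĵ'] from rfl,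
             show ("ĵ" : String).toList = ['ĵ'] from rfl,
             show ("Ŝ" : String).toList = ['Ŝ'] from rfl,
             show ("ŝ" : String).toList = ['ŝ'] from rfl,
             show ("Ŭ" : String).toList = ['Ŭ'] from rfl,
             show ("ŭ" : String).toList = ['ŭ'] from rfl]
  simp only [replace2_eq]
  simp [chainK, Ks]

-- ===== facts about the table, checked by computation =====
theorem ks_r_ne_nil : ∀ k ∈ Ks, k.2.2 ≠ [] := by decide
theorem ks_snd_ne_fst : ∀ k ∈ Ks, ∀ k' ∈ Ks, k.2.1 ≠ k'.1 := by
  intro k hk k' hk'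
  simp only [Ks, List.mem_cons, List.not_mem_nil, or_false] at hk hk'
  rcases hk with rfl|rfl|rfl|rfl|rfl|rfl|rfl|rfl|rfl|rfl|rfl|rfl <;> rcases hk' with rfl|rfl|rfl|rfl|rfl|rfl|rfl|rfl|rfl|rfl|rfl|rfl <;> decide
theorem ks_r_ne_fst : ∀ k ∈ Ks, ∀ k' ∈ Ks, ∀ x, k.2.2.head? = some x → x ≠ k'.1 := by
  intro k hk k' hk' x hx
  simp only [Ks, List.mem_cons, List.not_mem_nil, or_false] at hk hk'
  rcases hk with rfl|rfl|rfl|rfl|rfl|rfl|rfl|rfl|rfl|rfl|rfl|rfl <;>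
    (simp only [List.head?_cons, Option.some.injEq] at hx; subst hx) <;>
    rcases hk' with rfl|rfl|rfl|rfl|rfl|rfl|rfl|rfl|rfl|rfl|rfl|rfl <;> decide
theorem ks_r_ne_snd : ∀ k ∈ Ks, ∀ k' ∈ Ks, ∀ x, k.2.2.head? = some x → x ≠ k'.2.1 := by
  intro k hk k' hk' x hx
  simp only [Ks, List.mem_cons, List.not_mem_nil, or_false] at hk hk'
  rcases hk with rfl|rfl|rfl|rfl|rfl|rfl|rfl|rfl|rfl|rfl|rfl|rfl <;>
    (simp only [List.head?_cons, Option.some.injEq] at hx; subst hx) <;>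
    rcases hk' with rfl|rfl|rfl|rfl|rfl|rfl|rfl|rfl|rfl|rfl|rfl|rfl <;> decide
theorem ks_fst_nodup : (Ks.map (·.1)).Nodup := by decide
theorem ks_r_single : ∀ k ∈ Ks, ∃ e, k.2.2 = [e] := by
  intro k hk
  simp only [Ks, List.mem_cons, List.not_mem_nil, or_false] at hk
  rcases hk with rfl|rfl|rfl|rfl|rfl|rfl|rfl|rfl|rfl|rfl|rfl|rfl <;> exact ⟨_, rfl⟩

theorem key2_ne (a b c d : Char) (h : ¬(c = a ∧ d = b)) :
    (String.ofList [a,b] == String.ofList [c,d]) = false := by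
  rw [beq_eq_false_iff_ne]
  intro he
  rw [String.ofList_inj] at he
  simp only [List.cons.injEq, and_true] at he
  exact h ⟨he.1.symm, he.2.symm⟩

theorem key_ne_single (a b c : Char) :
    (String.ofList [a,b] == String.ofList [c]) = false := by
  rw [beq_eq_false_iff_ne]
  intro he
  rw [String.ofList_inj] at he
  simp at he

set_option maxRecDepth 16384 in
theorem cxDict_mk :
    cxDigraphs = PySem.Dict.mk [("CX","Ĉ"), ("cx","ĉ"), ("GX","Ĝ"), ("gx","ĝ"), ("HX","Ĥ"), ("hx","ĥ"), ("JX","Ĵ"), ("jx","ĵ"), ("SX","Ŝ"), ("sx","ŝ"), ("UX","Ŭ"), ("ux","ŭ")] := by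
  decide

theorem get_single (c : Char) : cxDigraphs.get? (String.ofList [c]) = none := by
  rw [cxDict_mk]
  simp only [PySem.Dict.get?_mk_cons,
             show ("CX" : String) = String.ofList ['C','X'] from rfl,
             show ("cx" : String) = String.ofList ['c','x'] from rfl,
             show ("GX" : String) = String.ofList ['G','X'] from rfl,
             show ("gx" : String) = String.ofList ['g','x'] from rfl,
             show ("HX" : String) = String.ofList ['H','X'] from rfl,
             show ("hx" : String) = String.ofList ['h','x'] from rfl,
             show ("JX" : String) = String.ofList ['J','X'] from rfl,
             show ("jx" : String) = String.ofList ['j','x'] from rfl,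
             show ("SX" : String) = String.ofList ['S','X'] from rfl,
             show ("sx" : String) = String.ofList ['s','x'] from rfl,
             show ("UX" : String) = String.ofList ['U','X'] from rfl,
             show ("ux" : String) = String.ofList ['u','x'] from rfl,
             key_ne_single, Bool.false_eq_true, if_false]
  rfl

theorem get_none (c d : Char) (h : ∀ k ∈ Ks, ¬(c = k.1 ∧ d = k.2.1)) :
    cxDigraphs.get? (String.ofList [c,d]) = none := by
  have h1 : ¬((String.ofList ['C','X'] == String.ofList [c,d]) = true) := by
    rw [key2_ne _ _ _ _ (h ('C','X',['Ĉ']) (by simp [Ks]))]; simp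
  have h2 : ¬((String.ofList ['c','x'] == String.ofList [c,d]) = true) := by
    rw [key2_ne _ _ _ _ (h ('c','x',['ĉ']) (by simp [Ks]))]; simp
  have h3 : ¬((String.ofList ['G','X'] == String.ofList [c,d]) = true) := by
    rw [key2_ne _ _ _ _ (h ('G','X',['Ĝ']) (by simp [Ks]))]; simp
  have h4 : ¬((String.ofList ['g','x'] == String.ofList [c,d]) = true) := by
    rw [key2_ne _ _ _ _ (h ('g','x',['ĝ']) (by simp [Ks]))]; simp
  have h5 : ¬((String.ofList ['H','X'] == String.ofList [c,d]) = true) := by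
    rw [key2_ne _ _ _ _ (h ('H','X',['Ĥ']) (by simp [Ks]))]; simp
  have h6 : ¬((String.ofList ['h','x'] == String.ofList [c,d]) = true) := by
    rw [key2_ne _ _ _ _ (h ('h','x',['ĥ']) (by simp [Ks]))]; simp
  have h7 : ¬((String.ofList ['J','X'] == String.ofList [c,d]) = true) := by
    rw [key2_ne _ _ _ _ (h ('J','X',['Ĵ']) (by simp [Ks]))]; simp
  have h8 : ¬((String.ofList ['j','x'] == String.ofList [c,d]) = true) := by
    rw [key2_ne _ _ _ _ (h ('j','x',['ĵ']) (by simp [Ks]))]; simp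
  have h9 : ¬((String.ofList ['S','X'] == String.ofList [c,d]) = true) := by
    rw [key2_ne _ _ _ _ (h ('S','X',['Ŝ']) (by simp [Ks]))]; simp
  have h10 : ¬((String.ofList ['s','x'] == String.ofList [c,d]) = true) := by
    rw [key2_ne _ _ _ _ (h ('s','x',['ŝ']) (by simp [Ks]))]; simp
  have h11 : ¬((String.ofList ['U','X'] == String.ofList [c,d]) = true) := by
    rw [key2_ne _ _ _ _ (h ('U','X',['Ŭ']) (by simp [Ks]))]; simp
  have h12 : ¬((String.ofList ['u','x'] == String.ofList [c,d]) = true) := by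
    rw [key2_ne _ _ _ _ (h ('u','x',['ŭ']) (by simp [Ks]))]; simp
  rw [cxDict_mk]
  simp only [PySem.Dict.get?_mk_cons,
             show ("CX" : String) = String.ofList ['C','X'] from rfl,
             show ("cx" : String) = String.ofList ['c','x'] from rfl,
             show ("GX" : String) = String.ofList ['G','X'] from rfl,
             show ("gx" : String) = String.ofList ['g','x'] from rfl,
             show ("HX" : String) = String.ofList ['H','X'] from rfl,
             show ("hx" : String) = String.ofList ['h','x'] from rfl,
             show ("JX" : String) = String.ofList ['J','X'] from rfl,
             show ("jx" : String) = String.ofList ['j','x'] from rfl,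
             show ("SX" : String) = String.ofList ['S','X'] from rfl,
             show ("sx" : String) = String.ofList ['s','x'] from rfl,
             show ("UX" : String) = String.ofList ['U','X'] from rfl,
             show ("ux" : String) = String.ofList ['u','x'] from rfl]
  rw [if_neg h1, if_neg h2, if_neg h3, if_neg h4, if_neg h5, if_neg h6, if_neg h7, if_neg h8, if_neg h9, if_neg h10, if_neg h11, if_neg h12]
  rfl

set_option maxRecDepth 16384 in
theorem get_mem (a b e : Char) (h : (a,b,[e]) ∈ Ks) :
    cxDigraphs.get? (String.ofList [a,b]) = some (String.ofList [e]) := by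
  simp only [Ks, List.mem_cons, List.not_mem_nil, or_false, Prod.mk.injEq,
             List.cons.injEq, and_true] at h
  rcases h with ⟨rfl,rfl,rfl⟩|⟨rfl,rfl,rfl⟩|⟨rfl,rfl,rfl⟩|⟨rfl,rfl,rfl⟩|⟨rfl,rfl,rfl⟩|⟨rfl,rfl,rfl⟩|⟨rfl,rfl,rfl⟩|⟨rfl,rfl,rfl⟩|⟨rfl,rfl,rfl⟩|⟨rfl,rfl,rfl⟩|⟨rfl,rfl,rfl⟩|⟨rfl,rfl,rfl⟩ <;> decide

-- ===== chain lemmas =====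
theorem rep_pass (a b : Char) (r : List Char) (c : Char) (m : List Char)
    (h : ¬(c = a ∧ m.head? = some b)) : rep a b r (c :: m) = c :: rep a b r m := by
  rw [rep_cons, if_neg h]

theorem head_rep (a b : Char) (r : List Char) (hr : r ≠ []) (m : List Char) :
    (rep a b r m).head? = m.head? ∨ (rep a b r m).head? = r.head? := by
  match m with
  | [] => left; rw [rep_nil]
  | c :: t =>
    rw [rep_cons]
    split
    · right; rw [List.head?_append_of_ne_nil _ hr]
    · left; rfl

theorem chainK_nil (K : List (Char × Char × List Char)) : chainK K [] = [] := by
  induction K with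
  | nil => rfl
  | cons k K ih =>
    simp only [chainK, List.foldl_cons, rep_nil]
    exact ih

theorem chainK_single (K : List (Char × Char × List Char)) (c : Char) : chainK K [c] = [c] := by
  induction K with
  | nil => rfl
  | cons k K ih =>
    simp only [chainK, List.foldl_cons]
    rw [rep_pass _ _ _ _ _ (by simp), rep_nil]
    exact ih

theorem chainK_cons_first (K : List (Char × Char × List Char)) (c : Char)
    (h : ∀ k ∈ K, c ≠ k.1) :
    ∀ m, chainK K (c :: m) = c :: chainK K m := by
  induction K with
  | nil => intro m; rfl
  | cons k K ih =>
    intro m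
    simp only [chainK, List.foldl_cons]
    rw [rep_pass _ _ _ _ _ (fun hc => h k (by simp) hc.1)]
    exact ih (fun k' hk' => h k' (by simp [hk'])) _

theorem chainK_pass (K : List (Char × Char × List Char)) (hK : ∀ k ∈ K, k ∈ Ks) (c : Char) :
    ∀ m, (∀ k ∈ Ks, ¬(c = k.1 ∧ m.head? = some k.2.1)) →
      chainK K (c :: m) = c :: chainK K m := by
  induction K with
  | nil => intro m _; rfl
  | cons k K ih =>
    intro m hc
    have hkKs : k ∈ Ks := hK k (by simp)
    simp only [chainK, List.foldl_cons]
    rw [rep_pass _ _ _ _ _ (hc k hkKs)]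
    apply ih (fun k' hk' => hK k' (by simp [hk']))
    intro k' hk'
    rcases head_rep k.1 k.2.1 k.2.2 (ks_r_ne_nil k hkKs) m with hh | hh
    · rw [hh]; exact hc k' hk'
    · rw [hh]
      rcases hre : k.2.2.head? with _ | x
      · simp
      · intro hcontra
        exact ks_r_ne_snd k hkKs k' hk' x hre (Option.some.inj hcontra.2)

theorem chainK_append (K1 K2 : List (Char × Char × List Char)) (l : List Char) :
    chainK (K1 ++ K2) l = chainK K2 (chainK K1 l) := by
  simp [chainK, List.foldl_append]

theorem chain_match (a b e : Char) (h : (a,b,[e]) ∈ Ks) (t : List Char) :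
    chainK Ks (a :: b :: t) = e :: chainK Ks t := by
  obtain ⟨K1, K2, hsplit⟩ := List.append_of_mem h
  have hmem1 : ∀ k ∈ K1, k ∈ Ks := by intro k hk; rw [hsplit]; simp [hk]
  have hmem2 : ∀ k ∈ K2, k ∈ Ks := by intro k hk; rw [hsplit]; simp [hk]
  have hnodup := ks_fst_nodup
  rw [hsplit] at hnodup
  simp only [List.map_append, List.map_cons, List.nodup_append, List.nodup_cons] at hnodup
  have ha_not1 : ∀ k ∈ K1, a ≠ k.1 := by
    intro k hk he
    exact hnodup.2.2 k.1 (List.mem_map_of_mem hk) a (by simp) he.symm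
  have hb_not1 : ∀ k ∈ K1, b ≠ k.1 :=
    fun k hk => ks_snd_ne_fst (a,b,[e]) h k (hmem1 k hk)
  have he_not2 : ∀ k ∈ K2, e ≠ k.1 :=
    fun k hk => ks_r_ne_fst (a,b,[e]) h k (hmem2 k hk) e rfl
  rw [hsplit, chainK_append, chainK_append]
  rw [chainK_cons_first K1 a ha_not1, chainK_cons_first K1 b hb_not1]
  have hstep : ∀ X, chainK ((a,b,[e]) :: K2) X = chainK K2 (rep a b [e] X) := fun X => rfl
  rw [hstep, hstep]
  rw [rep_cons, if_pos (by simp)]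
  simp only [List.tail_cons, List.singleton_append]
  rw [chainK_cons_first K2 e he_not2]

theorem main_eq : ∀ (n : Nat) (l : List Char), l.length ≤ n → chainK Ks l = cxScan l := by
  intro n
  induction n with
  | zero =>
    intro l h
    cases l with
    | nil => rw [chainK_nil, cxScan]
    | cons c t => simp at h
  | succ n ih =>
    intro l h
    match l with
    | [] => rw [chainK_nil, cxScan]
    | [c] =>
      rw [chainK_single]
      conv_rhs => rw [cxScan]
      simp [get_single, cxScan]
    | c :: d :: t =>
      by_cases hk : ∀ k ∈ Ks, ¬(c = k.1 ∧ d = k.2.1)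
      · -- no digraph starts here: both sides copy one character
        rw [chainK_pass Ks (fun k hkk => hkk) c (d :: t)
            (by intro k hkk; simpa using hk k hkk)]
        rw [ih (d :: t) (by simp at h ⊢; omega)]
        conv_rhs => rw [cxScan]
        simp only [List.take_succ_cons, List.take_zero]
        rw [get_none c d hk]
      · -- the digraph (c,d) is in the table: both sides emit its replacement and jump two
        push Not at hk
        obtain ⟨k, hkKs, hck, hdk⟩ := hk
        obtain ⟨e, he⟩ := ks_r_single k hkKs
        have hk2 : (c, d, [e]) ∈ Ks := by
          rw [hck, hdk, ← he]
          exact hkKs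
        rw [chain_match c d e hk2]
        rw [ih t (by simp at h ⊢; omega)]
        conv_rhs => rw [cxScan]
        simp only [List.take_succ_cons, List.take_zero, List.drop_succ_cons, List.drop_zero]
        rw [get_mem c d e hk2]
        simp only [show ∀ x : Char, (String.ofList [x]).toList = [x] from fun _ => by simp]
        rfl

-- ===== VERDICT (by name: the statement is the Claim_ definition above) =====
theorem normalize_cx_system_spec : Claim_equal_normalize_cx_system := by
  intro text _
  unfold Spec_normalize_cx_system
  have h1 := A_toList text
  rw [main_eq text.toList.length text.toList le_rfl] at h1
  have h2 : (normalize_cx_system_alt text).toList = cxScan text.toList := by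
    rw [normalize_cx_system_alt]; simp
  exact String.toList_inj.mp (h1.trans h2.symm)
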